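-- pv_equiv track=rewrite | github.com/teake16/MSW-WordFreqCheck | word_freq_check.py | updateScores
-- ===== SOURCE A (Python) =====
-- def updateScores(l, d, bonus):
--     alreadyUsedElts = [" "]
--     alreadyUsedElts.clear()
--     for elt in l:
--         if elt in d:
--             if alreadyUsedElts.count(elt) > 0:
--                 d[elt] += bonus
--             else:
--                 alreadyUsedElts.append(elt)
--                 d[elt] += 1
--         else:
--             alreadyUsedElts.append(elt)
--             d[elt] = 1
--     return d
-- ===== SOURCE B (Python) =====
-- def updateScores(l, d, bonus):
--     # Count-table pass: tally occurrences of each element (first-occurrence order),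
--     # then update each distinct key once with a closed-form bonus total.
--     # Mutates d in place, like the original.
--     counts = {}
--     for elt in l:
--         counts[elt] = counts.get(elt, 0) + 1
--     for elt, cnt in counts.items():
--         base = d[elt] + 1 if elt in d else 1
--         d[elt] = base + (cnt - 1) * bonus
--     return d
-- ===== Notes on version B (the rewrite author's own statement) =====
-- stated objective: faster
-- what changed: Replaces A's per-occurrence simulation with a seen-list (a linear membership/count scan of the seen-list per element) by a two-pass count-table algorithm: build a frequency dict over l, then update each distinct key exactly once with the closed-form value base + (cnt-1)*bonus; Pre_ only excludes association lists with duplicate keys, which do not encode any Python dict.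
import Mathlib
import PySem

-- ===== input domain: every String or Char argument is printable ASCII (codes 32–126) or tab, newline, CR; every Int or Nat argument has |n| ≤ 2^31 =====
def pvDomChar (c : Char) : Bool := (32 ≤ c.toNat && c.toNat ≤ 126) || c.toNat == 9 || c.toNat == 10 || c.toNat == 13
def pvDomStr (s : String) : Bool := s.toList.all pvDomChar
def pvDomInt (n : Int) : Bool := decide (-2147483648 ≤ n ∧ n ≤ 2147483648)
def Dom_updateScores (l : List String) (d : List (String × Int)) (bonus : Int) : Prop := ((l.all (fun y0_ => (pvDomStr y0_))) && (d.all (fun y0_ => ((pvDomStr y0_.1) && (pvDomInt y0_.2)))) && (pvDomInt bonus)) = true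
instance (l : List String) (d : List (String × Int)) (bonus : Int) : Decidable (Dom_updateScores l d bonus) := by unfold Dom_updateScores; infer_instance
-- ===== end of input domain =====

-- B replaces A's per-occurrence seen-list simulation by a count-table pass with a
-- closed-form per-key update (alternative decomposition; equivalence is about the
-- return value — both Pythons mutate d in place identically).


-- ===== PORT A =====
-- loop 'for elt in l' over state (d, alreadyUsedElts); 'alreadyUsedElts = [" "]; .clear()' starts it empty
def updateScoresGo (bonus : Int) : List String → PySem.Dict String Int → List String → PySem.Dict String Int
  | [], d, _ => d
  | elt :: rest, d, used =>
    if d.contains elt then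
      if PySem.List.count used elt > 0 then
        updateScoresGo bonus rest (d.insert elt (d.getD elt 0 + bonus)) used      -- d[elt] += bonus (elt in d)
      else
        updateScoresGo bonus rest (d.insert elt (d.getD elt 0 + 1)) (used ++ [elt])  -- d[elt] += 1
    else
      updateScoresGo bonus rest (d.insert elt 1) (used ++ [elt])                  -- d[elt] = 1

def updateScores (l : List String) (d : List (String × Int)) (bonus : Int) : List (String × Int) :=
  (updateScoresGo bonus l (PySem.Dict.mk d) []).items

-- ===== PORT B =====
-- 'base = d[elt] + 1 if elt in d else 1; d[elt] = base + (cnt - 1) * bonus'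
def updateScoresAltStep (bonus : Int) (d : PySem.Dict String Int) (p : String × Int) : PySem.Dict String Int :=
  let base : Int := if d.contains p.1 then d.getD p.1 0 + 1 else 1
  d.insert p.1 (base + (p.2 - 1) * bonus)

def updateScores_alt (l : List String) (d : List (String × Int)) (bonus : Int) : List (String × Int) :=
  -- counts = {}; for elt in l: counts[elt] = counts.get(elt, 0) + 1
  let counts : PySem.Dict String Int := l.foldl (fun c elt => c.insert elt (c.getD elt 0 + 1)) PySem.Dict.empty
  -- for elt, cnt in counts.items(): ...
  (counts.items.foldl (updateScoresAltStep bonus) (PySem.Dict.mk d)).items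

-- ===== PRECONDITION & SPEC =====
-- Pre_ excludes association lists with duplicate keys: a Python dict cannot hold a
-- duplicate key, so such lists do not encode any input the Python accepts.
def Pre_updateScores (l : List String) (d : List (String × Int)) (bonus : Int) : Prop :=
  (d.map Prod.fst).Nodup
instance (l : List String) (d : List (String × Int)) (bonus : Int) : Decidable (Pre_updateScores l d bonus) := by unfold Pre_updateScores; infer_instance

def pvWitness_updateScores : List String × (List (String × Int)) × Int :=
  (["a", "b", "a"], [("a", 3)], 2)

def Spec_updateScores (l : List String) (d : List (String × Int)) (bonus : Int) (out : List (String × Int)) : Prop := out = updateScores_alt l d bonus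
instance (l : List String) (d : List (String × Int)) (bonus : Int) (out : List (String × Int)) : Decidable (Spec_updateScores l d bonus out) := by unfold Spec_updateScores; infer_instance

-- ===== CLAIM (what is proved, stated in full; the proofs are below) =====
def Claim_equal_updateScores : Prop := ∀ (l : List String) (d : List (String × Int)) (bonus : Int), Dom_updateScores l d bonus → Pre_updateScores l d bonus → Spec_updateScores l d bonus (updateScores l d bonus)

-- ===== LEMMAS AND PROOFS =====

-- the seen-list only matters through membership of the elements still to process
lemma go_used_congr (bonus : Int) :
    ∀ (l : List String) (d : PySem.Dict String Int) (used used' : List String),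
      (∀ y ∈ l, (y ∈ used ↔ y ∈ used')) →
      updateScoresGo bonus l d used = updateScoresGo bonus l d used' := by
  intro l
  induction l with
  | nil => intro d used used' _; rfl
  | cons elt rest ih =>
    intro d used used' h
    have hmem : elt ∈ used ↔ elt ∈ used' := h elt (by simp)
    have hrest : ∀ y ∈ rest, (y ∈ used ↔ y ∈ used') := fun y hy => h y (by simp [hy])
    have hrest' : ∀ y ∈ rest, (y ∈ used ++ [elt] ↔ y ∈ used' ++ [elt]) := by
      intro y hy; simp [List.mem_append, hrest y hy]
    simp only [updateScoresGo]
    by_cases hc : d.contains elt = true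
    · rw [if_pos hc, if_pos hc]
      by_cases hu : elt ∈ used
      · rw [if_pos (by simpa [PySem.List.count_eq, List.count_pos_iff] using hu),
            if_pos (by simpa [PySem.List.count_eq, List.count_pos_iff] using hmem.mp hu)]
        exact ih _ _ _ hrest
      · rw [if_neg (by simpa [PySem.List.count_eq, List.count_pos_iff] using hu),
            if_neg (by simpa [PySem.List.count_eq, List.count_pos_iff] using (hmem.not.mp hu))]
        exact ih _ _ _ hrest'
    · rw [if_neg hc, if_neg hc]
      exact ih _ _ _ hrest'

-- overwriting a present key with its current value is the identity (keys Nodup)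
lemma insert_getD_self (d : PySem.Dict String Int) (x : String)
    (hc : d.contains x = true) (hnd : d.keys.Nodup) :
    d.insert x (d.getD x 0) = d := by
  apply PySem.Dict.ext
  rw [PySem.Dict.items_insert_of_contains d _ hc]
  conv_rhs => rw [← List.map_id d.items]
  apply List.map_congr_left
  intro p hp
  by_cases hpx : p.1 = x
  · have h2 : d.getD x 0 = p.2 := PySem.Dict.getD_of_mem_items d (by rw [← hpx]; exact hp) hnd 0
    simp only [hpx, beq_self_eq_true, if_true, h2, id_eq]
    exact Prod.ext hpx.symm rfl
  · simp [hpx]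

-- inserts at distinct keys commute when x is already present
lemma insert_comm_present (d : PySem.Dict String Int) (x y : String) (hxy : x ≠ y)
    (hx : d.contains x = true) (v a : Int) :
    (d.insert y a).insert x v = (d.insert x v).insert y a := by
  apply PySem.Dict.ext
  by_cases hy : d.contains y = true
  · have hx' : (d.insert y a).contains x = true := by
      rw [PySem.Dict.contains_insert]; simp [hx]
    have hy' : (d.insert x v).contains y = true := by
      rw [PySem.Dict.contains_insert]; simp [hy]
    rw [PySem.Dict.items_insert_of_contains _ _ hx', PySem.Dict.items_insert_of_contains d _ hy,
        PySem.Dict.items_insert_of_contains _ _ hy', PySem.Dict.items_insert_of_contains d _ hx,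
        List.map_map, List.map_map]
    apply List.map_congr_left
    intro p _
    by_cases h1 : p.1 = x
    · simp [Function.comp, h1, hxy]
    · by_cases h2 : p.1 = y
      · simp [Function.comp, h2, Ne.symm hxy]
      · simp [Function.comp, h1, h2]
  · have hyf : d.contains y = false := by simpa using hy
    have hx' : (d.insert y a).contains x = true := by
      rw [PySem.Dict.contains_insert]; simp [hx]
    have hy' : (d.insert x v).contains y = false := by
      rw [PySem.Dict.contains_insert]; simp [hyf, Ne.symm hxy]
    rw [PySem.Dict.items_insert_of_contains _ _ hx',
        PySem.Dict.items_insert_of_not_contains d _ hyf,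
        PySem.Dict.items_insert_of_not_contains _ _ hy',
        PySem.Dict.items_insert_of_contains d _ hx,
        List.map_append]
    simp [Ne.symm hxy]

-- bump: once x is marked used and present, its remaining occurrences just add bonus;
-- they can be stripped from l and applied in closed form
lemma go_bump (bonus : Int) :
    ∀ (l : List String) (d : PySem.Dict String Int) (used : List String) (x : String),
      x ∈ used → d.contains x = true → d.keys.Nodup →
      updateScoresGo bonus l d used =
        updateScoresGo bonus (l.filter (fun y => y ≠ x))
          (d.insert x (d.getD x 0 + (l.count x : Int) * bonus)) used := by
  intro l
  induction l with
  | nil =>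
    intro d used x hu hx hnd
    simp only [updateScoresGo, List.filter_nil, List.count_nil, Int.natCast_zero, zero_mul,
      add_zero]
    exact (insert_getD_self d x hx hnd).symm
  | cons elt rest ih =>
    intro d used x hu hx hnd
    by_cases hex : elt = x
    · subst hex
      have hcnt : PySem.List.count used elt > 0 := by
        simpa [PySem.List.count_eq, List.count_pos_iff] using hu
      have hfil : (elt :: rest).filter (fun y => y ≠ elt) = rest.filter (fun y => y ≠ elt) := by
        simp
      simp only [updateScoresGo, if_pos hx, if_pos hcnt]
      rw [ih (d.insert elt (d.getD elt 0 + bonus)) used elt hu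
            (by rw [PySem.Dict.contains_insert]; simp)
            (PySem.Dict.nodup_keys_insert d _ _ hnd),
          PySem.Dict.getD_insert_self, PySem.Dict.insert_insert_self, hfil]
      have hv : d.getD elt 0 + bonus + (rest.count elt : Int) * bonus
          = d.getD elt 0 + ((elt :: rest).count elt : Int) * bonus := by
        rw [List.count_cons_self]; push_cast; ring
      rw [hv]
    · have hxelt : x ≠ elt := fun h => hex h.symm
      have hfil : (elt :: rest).filter (fun y => y ≠ x) = elt :: rest.filter (fun y => y ≠ x) := by
        simp [hex]
      have hc1 : ((elt :: rest).count x : Int) = (rest.count x : Int) := by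
        simp [hex]
      have hcont : ∀ w : Int, (d.insert elt w).contains x = true := fun w => by
        rw [PySem.Dict.contains_insert]; simp [hx]
      have hgd : ∀ w : Int, (d.insert elt w).getD x 0 = d.getD x 0 := fun w =>
        PySem.Dict.getD_insert_of_ne _ _ _ hxelt
      have hDc : ∀ V : Int, (d.insert x V).contains elt = d.contains elt := fun V => by
        rw [PySem.Dict.contains_insert]; simp [hex]
      have hDg : ∀ V : Int, (d.insert x V).getD elt 0 = d.getD elt 0 := fun V =>
        PySem.Dict.getD_insert_of_ne _ _ _ hex
      rw [hfil]
      by_cases hce : d.contains elt = true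
      · by_cases hcu : PySem.List.count used elt > 0
        · simp only [updateScoresGo, if_pos hce, if_pos hcu, hDc, hDg]
          rw [ih _ used x hu (hcont _) (PySem.Dict.nodup_keys_insert d _ _ hnd), hgd,
              insert_comm_present d x elt hxelt hx _ _, hc1]
        · simp only [updateScoresGo, if_pos hce, if_neg hcu, hDc, hDg]
          rw [ih _ (used ++ [elt]) x (by simp [hu]) (hcont _)
                (PySem.Dict.nodup_keys_insert d _ _ hnd), hgd,
              insert_comm_present d x elt hxelt hx _ _, hc1]
      · simp only [updateScoresGo, if_neg hce, hDc, hDg]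
        rw [ih _ (used ++ [elt]) x (by simp [hu]) (hcont _)
              (PySem.Dict.nodup_keys_insert d _ _ hnd), hgd,
            insert_comm_present d x elt hxelt hx _ _, hc1]

lemma ofList_filter_ne (x : String) :
    ∀ (l : List String),
      PySem.Set.ofList (l.filter (fun y => y ≠ x)) = PySem.Set.discard (PySem.Set.ofList l) x := by
  have discard_comm : ∀ (s : List String) (a b : String),
      PySem.Set.discard (PySem.Set.discard s a) b = PySem.Set.discard (PySem.Set.discard s b) a := by
    intro s a b
    simp only [PySem.Set.discard, List.filter_filter]
    exact List.filter_congr (fun c _ => by rw [Bool.and_comm])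
  intro l
  induction l with
  | nil => simp [PySem.Set.discard]
  | cons y l ih =>
    by_cases hyx : y = x
    · subst hyx
      rw [List.filter_cons_of_neg (by simp), ih, PySem.Set.ofList_cons]
      simp only [PySem.Set.discard]
      rw [List.filter_cons_of_neg (by simp), List.filter_filter]
      exact List.filter_congr (fun c _ => by rw [Bool.and_self])
    · rw [List.filter_cons_of_pos (by simp [hyx]), PySem.Set.ofList_cons, PySem.Set.ofList_cons, ih]
      simp only [PySem.Set.discard]
      rw [List.filter_cons_of_pos (by simp [hyx])]
      exact congrArg (y :: ·) (discard_comm _ _ _)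

lemma main_lemma (bonus : Int) :
    ∀ (n : Nat) (l : List String), l.length ≤ n →
      ∀ (d : PySem.Dict String Int), d.keys.Nodup →
        updateScoresGo bonus l d [] =
          (PySem.Dict.counter l).items.foldl (updateScoresAltStep bonus) d := by
  intro n
  induction n with
  | zero =>
    intro l hl d hnd
    have hnil : l = [] := List.eq_nil_of_length_eq_zero (Nat.le_zero.mp hl)
    subst hnil
    simp [updateScoresGo, PySem.Dict.items_counter]
  | succ n ih =>
    intro l hl d hnd
    match l with
    | [] => simp [updateScoresGo, PySem.Dict.items_counter]
    | elt :: rest =>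
      have hflen : (rest.filter (fun y => y ≠ elt)).length ≤ n :=
        le_trans (List.length_filter_le _ _) (by simpa using hl)
      have hitems : (PySem.Dict.counter (elt :: rest)).items
          = (elt, ((elt :: rest).count elt : Int)) ::
            (PySem.Dict.counter (rest.filter (fun y => y ≠ elt))).items := by
        rw [PySem.Dict.items_counter, PySem.Set.ofList_cons, ← ofList_filter_ne, List.map_cons,
            PySem.Dict.items_counter]
        congr 1
        apply List.map_congr_left
        intro k hk
        have hkne : k ≠ elt := by
          have h1 := (PySem.Set.mem_ofList _ _).mp hk
          simpa using (List.mem_filter.mp h1).2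
        have hcq : List.count k (elt :: rest) = List.count k (rest.filter (fun y => y ≠ elt)) := by
          rw [List.count_filter (by simp [hkne]), List.count_cons]
          simp [Ne.symm hkne]
        rw [hcq]
      rw [hitems, List.foldl_cons]
      have hcnt0 : ¬ (PySem.List.count ([] : List String) elt > 0) := by
        simp [PySem.List.count_eq]
      have hucongr : ∀ (d' : PySem.Dict String Int),
          updateScoresGo bonus (rest.filter (fun y => y ≠ elt)) d' [elt]
            = updateScoresGo bonus (rest.filter (fun y => y ≠ elt)) d' [] := by
        intro d'
        refine go_used_congr bonus _ _ [elt] [] (fun y hy => ?_)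
        have : y ≠ elt := by simpa using (List.mem_filter.mp hy).2
        simp [this]
      by_cases hc : d.contains elt = true
      · simp only [updateScoresGo, if_pos hc, if_neg hcnt0, List.nil_append]
        rw [go_bump bonus rest _ [elt] elt (by simp)
              (by rw [PySem.Dict.contains_insert]; simp)
              (PySem.Dict.nodup_keys_insert d _ _ hnd),
            PySem.Dict.getD_insert_self, PySem.Dict.insert_insert_self, hucongr,
            ih _ hflen _ (PySem.Dict.nodup_keys_insert d _ _ hnd)]
        have hv : d.getD elt 0 + 1 + (rest.count elt : Int) * bonus
            = (d.getD elt 0 + 1) + (((elt :: rest).count elt : Int) - 1) * bonus := by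
          rw [List.count_cons_self]; push_cast; ring
        rw [hv]
        simp only [updateScoresAltStep, if_pos hc]
      · simp only [updateScoresGo, if_neg hc, if_neg hcnt0, List.nil_append]
        rw [go_bump bonus rest _ [elt] elt (by simp)
              (by rw [PySem.Dict.contains_insert]; simp)
              (PySem.Dict.nodup_keys_insert d _ _ hnd),
            PySem.Dict.getD_insert_self, PySem.Dict.insert_insert_self, hucongr,
            ih _ hflen _ (PySem.Dict.nodup_keys_insert d _ _ hnd)]
        have hv : (1 : Int) + (rest.count elt : Int) * bonus
            = (1 : Int) + (((elt :: rest).count elt : Int) - 1) * bonus := by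
          rw [List.count_cons_self]; push_cast; ring
        rw [hv]
        simp only [updateScoresAltStep, if_neg hc]

-- ===== VERDICT (by name: the statement is the Claim_ definition above) =====
theorem updateScores_spec : Claim_equal_updateScores := by
  intro l d bonus _ hpre
  have hnd : (PySem.Dict.mk d).keys.Nodup := by
    simpa [PySem.Dict.keys_mk] using hpre
  unfold Spec_updateScores updateScores updateScores_alt
  rw [PySem.Dict.foldl_insert_getD_add_one_eq_counter]
  exact congrArg PySem.Dict.items (main_lemma bonus l.length l le_rfl _ hnd)
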